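-- pv_equiv track=rewrite | github.com/lehancode/uba_computacion | parciales/Simulacro - 2do-cuatrimestre/simulacro.py | matriz_cuasi_decreciente
-- ===== SOURCE A (Python) =====
-- def maximo(columna: list[int]) -> int:
--   res: int = 0
--   for n in columna:
--     if n > res:
--       res = n
--   return res
--
-- def obtener_columna(matriz: list[list[int]], columna: int) -> list[int]:
--   res: list[int] = []
--   for f in matriz:
--     res.append(f[columna])
--   return res
--
-- def obtener_columnas(matriz: list[list[int]]) -> list[list[int]]:
--   columnas: list[list[int]] = []
--   for f in range(len(matriz)):
--     columna: list[int] = obtener_columna(matriz, f)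
--     columnas.append(columna)
--   return columnas
--
-- def matriz_cuasi_decreciente(matriz: list[list[int]]) -> bool:
--     res: bool = True
--     columnas: list[list[int]] = obtener_columnas(matriz)
--     maximo_columna_i: int = maximo(columnas[0])
--     col_actual: int = 1
--
--     while (res and col_actual < len(columnas)):
--       maximo_col_i_mas_1: int = maximo(columnas[col_actual])
--       res = (maximo_columna_i > maximo_col_i_mas_1)
--       col_actual += 1
--       maximo_columna_i = maximo_col_i_mas_1
--
--     return res
-- ===== SOURCE B (Python) =====
-- def matriz_cuasi_decreciente(matriz):
--     n = len(matriz)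
--     maxs = [0] * n
--     for fila in matriz:
--         maxs = [fila[j] if fila[j] > maxs[j] else maxs[j] for j in range(n)]
--     return all(maxs[j] > maxs[j + 1] for j in range(n - 1))
-- ===== Notes on version B (the rewrite author's own statement) =====
-- stated objective: alternative
-- what changed: B makes a single row-by-row pass maintaining a vector of running 0-floored column maxima (no column extraction, no column-wise loop with early exit), then checks once that the finished vector is strictly decreasing; A transposes the matrix and walks columns pairwise with an early-exit while loop.
import Mathlib
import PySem

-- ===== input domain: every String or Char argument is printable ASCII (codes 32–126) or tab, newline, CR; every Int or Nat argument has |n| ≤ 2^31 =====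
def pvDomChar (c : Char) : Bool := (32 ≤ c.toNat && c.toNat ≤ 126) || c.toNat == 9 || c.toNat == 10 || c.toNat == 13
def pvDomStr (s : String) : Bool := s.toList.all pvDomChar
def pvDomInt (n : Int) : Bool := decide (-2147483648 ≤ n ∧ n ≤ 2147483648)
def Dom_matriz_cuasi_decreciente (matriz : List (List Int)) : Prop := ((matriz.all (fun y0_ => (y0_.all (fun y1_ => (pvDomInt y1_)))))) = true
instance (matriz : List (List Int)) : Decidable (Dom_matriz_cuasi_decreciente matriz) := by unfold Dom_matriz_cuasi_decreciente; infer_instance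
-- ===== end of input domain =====

-- B replaces A's column-extraction + early-exit while loop by a single row-by-row pass
-- that maintains a vector of running 0-floored column maxima, checked once at the end.

-- ===== PORT A =====
-- maximo: 0-floored maximum of a list
def maximoA (columna : List Int) : Int :=
  columna.foldl (fun res n => if n > res then n else res) 0

-- obtener_columna: f[columna] for each row; pyGetD is exact under Pre_ (index in range)
def obtener_columnaA (matriz : List (List Int)) (columna : Int) : List Int :=
  matriz.map (fun f => PySem.List.pyGetD f columna 0)

-- obtener_columnas: for f in range(len(matriz))
def obtener_columnasA (matriz : List (List Int)) : List (List Int) :=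
  (PySem.List.pyRange 0 matriz.length 1).map (fun f => obtener_columnaA matriz f)

-- the while loop: iterates columnas[1], columnas[2], … while res holds
def loopA : List (List Int) → Bool → Int → Bool
  | [], res, _ => res
  | c :: rest, res, prevMax =>
    if res then
      let m := maximoA c
      loopA rest (decide (prevMax > m)) m
    else res

def matriz_cuasi_decreciente (matriz : List (List Int)) : Bool :=
  let columnas := obtener_columnasA matriz
  -- columnas[0] raises IndexError on the empty matrix (excluded by Pre_)
  let maximo_columna_i := maximoA (PySem.List.pyGetD columnas 0 [])
  loopA (columnas.drop 1) true maximo_columna_i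

-- ===== PORT B =====
-- one row: maxs = [fila[j] if fila[j] > maxs[j] else maxs[j] for j in range(n)]
def stepRowB (n : Int) (maxs fila : List Int) : List Int :=
  (PySem.List.pyRange 0 n 1).map (fun j =>
    if PySem.List.pyGetD fila j 0 > PySem.List.pyGetD maxs j 0
    then PySem.List.pyGetD fila j 0 else PySem.List.pyGetD maxs j 0)

def matriz_cuasi_decreciente_alt (matriz : List (List Int)) : Bool :=
  let n : Int := matriz.length
  -- maxs = [0] * n, then one pass over the rows
  let maxs := matriz.foldl (fun ms fila => stepRowB n ms fila) (List.replicate matriz.length 0)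
  -- all(maxs[j] > maxs[j+1] for j in range(n-1))
  (PySem.List.pyRange 0 (n - 1) 1).all (fun j =>
    decide (PySem.List.pyGetD maxs j 0 > PySem.List.pyGetD maxs (j + 1) 0))

-- ===== PRECONDITION & SPEC =====
-- Pre_ excludes exactly the inputs where A raises IndexError: the empty matrix
-- (columnas[0] on []) and matrices with a row shorter than len(matriz)
-- (obtener_columnas reads column j for every j < len(matriz) in every row).
def Pre_matriz_cuasi_decreciente (matriz : List (List Int)) : Prop :=
  matriz ≠ [] ∧ ∀ f ∈ matriz, matriz.length ≤ f.length
instance (matriz : List (List Int)) : Decidable (Pre_matriz_cuasi_decreciente matriz) := by unfold Pre_matriz_cuasi_decreciente; infer_instance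

def pvWitness_matriz_cuasi_decreciente : List (List Int) := [[5, 1], [2, 0]]

def Spec_matriz_cuasi_decreciente (matriz : List (List Int)) (out : Bool) : Prop := out = matriz_cuasi_decreciente_alt matriz
instance (matriz : List (List Int)) (out : Bool) : Decidable (Spec_matriz_cuasi_decreciente matriz out) := by unfold Spec_matriz_cuasi_decreciente; infer_instance

-- ===== CLAIM (what is proved, stated in full; the proofs are below) =====
def Claim_equal_matriz_cuasi_decreciente : Prop := ∀ (matriz : List (List Int)), Dom_matriz_cuasi_decreciente matriz → Pre_matriz_cuasi_decreciente matriz → Spec_matriz_cuasi_decreciente matriz (matriz_cuasi_decreciente matriz)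

-- ===== LEMMAS AND PROOFS =====

-- the 0-floored running maximum of column j, shared characterisation of both sides
def colmax (matriz : List (List Int)) (j : Int) : Int :=
  matriz.foldl (fun m f => if PySem.List.pyGetD f j 0 > m then PySem.List.pyGetD f j 0 else m) 0

-- the strict-decrease chain check, shared characterisation of both sides
def decList : Int → List Int → Bool
  | _, [] => true
  | p, c :: r => (decide (p > c)) && decList c r

theorem all_congr_mem {α : Type} (l : List α) (f g : α → Bool)
    (h : ∀ x ∈ l, f x = g x) : l.all f = l.all g := by
  induction l with
  | nil => rfl
  | cons a t ih =>
    simp only [List.all_cons, h a (List.mem_cons_self), ih fun x hx => h x (List.mem_cons_of_mem a hx)]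

-- A's max of a materialized column is the running column max
theorem maximo_columna_eq (matriz : List (List Int)) (j : Int) :
    maximoA (obtener_columnaA matriz j) = colmax matriz j := by
  simp [maximoA, obtener_columnaA, colmax, List.foldl_map]

theorem loopA_false (cs : List (List Int)) (p : Int) : loopA cs false p = false := by
  cases cs <;> simp [loopA]

-- A's early-exit while loop computes the chain check over the column maxima
theorem loopA_decList (cs : List (List Int)) (p : Int) :
    loopA cs true p = decList p (cs.map maximoA) := by
  induction cs generalizing p with
  | nil => rfl
  | cons c rest ih =>
    simp only [loopA, List.map_cons, decList, if_true]
    by_cases h : p > maximoA c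
    · simp [h, ih]
    · simp [h, loopA_false]

-- one B row-step on a vector indexed by range n applies the max-update pointwise
theorem stepRowB_map (n : Int) (g : Int → Int) (fila : List Int) :
    stepRowB n ((PySem.List.pyRange 0 n 1).map g) fila
      = (PySem.List.pyRange 0 n 1).map
          (fun j => if PySem.List.pyGetD fila j 0 > g j then PySem.List.pyGetD fila j 0 else g j) := by
  unfold stepRowB
  apply List.map_congr_left
  intro j hj
  rw [PySem.List.mem_pyRange_one] at hj
  rw [PySem.List.pyGetD_map_pyRange_of_nonneg g n j 0 hj.1 hj.2]

-- folding B's row steps over the rows yields the vector of column maxima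
theorem foldl_stepRowB (n : Int) (rows : List (List Int)) (g : Int → Int) :
    rows.foldl (fun ms fila => stepRowB n ms fila) ((PySem.List.pyRange 0 n 1).map g)
      = (PySem.List.pyRange 0 n 1).map
          (fun j => rows.foldl (fun m f => if PySem.List.pyGetD f j 0 > m then PySem.List.pyGetD f j 0 else m) (g j)) := by
  induction rows generalizing g with
  | nil => rfl
  | cons f rest ih =>
    simp only [List.foldl_cons]
    rw [stepRowB_map, ih]

-- the nat-indexed adjacency check equals the chain check, shifted by one
theorem chain_all_eq (g : Int → Int) (k : Nat) : ∀ (a : Int),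
    decList (g a) ((PySem.List.pyRange (a + 1) (a + 1 + k) 1).map g)
      = (PySem.List.pyRange a (a + k) 1).all (fun j => decide (g j > g (j + 1))) := by
  induction k with
  | zero =>
    intro a
    rw [PySem.List.pyRange_one_eq_nil (by omega), PySem.List.pyRange_one_eq_nil (by omega)]
    rfl
  | succ m ih =>
    intro a
    rw [PySem.List.pyRange_one_cons (a := a + 1) (by push_cast; omega),
        PySem.List.pyRange_one_cons (a := a) (by push_cast; omega)]
    simp only [List.map_cons, decList, List.all_cons]
    have h1 : a + 1 + ((m : Int) + 1) = (a + 1) + 1 + m := by ring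
    have h2 : a + ((m : Int) + 1) = (a + 1) + m := by ring
    push_cast
    rw [h1, h2, ih (a + 1)]

-- ===== VERDICT (by name: the statement is the Claim_ definition above) =====
theorem matriz_cuasi_decreciente_spec : Claim_equal_matriz_cuasi_decreciente := by
  intro matriz _hdom hpre
  obtain ⟨hne, _⟩ := hpre
  unfold Spec_matriz_cuasi_decreciente matriz_cuasi_decreciente matriz_cuasi_decreciente_alt
  have hlen : (0 : Int) < matriz.length := by
    cases matriz with
    | nil => exact absurd rfl hne
    | cons a l => simp
  -- A side
  have hrange : PySem.List.pyRange 0 (matriz.length : Int) 1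
      = 0 :: PySem.List.pyRange 1 (matriz.length : Int) 1 :=
    PySem.List.pyRange_one_cons hlen
  simp only [obtener_columnasA, hrange, List.map_cons, List.drop_succ_cons, List.drop_zero,
    PySem.List.pyGetD_zero_cons, loopA_decList, List.map_map]
  have hmapA : ∀ js : List Int, js.map (maximoA ∘ obtener_columnaA matriz) = js.map (colmax matriz) :=
    fun js => List.map_congr_left fun j _ => maximo_columna_eq matriz j
  rw [maximo_columna_eq, hmapA]
  -- B side: replicate = range-indexed constant vector, then fold to column maxima
  have hrep : List.replicate matriz.length (0 : Int)
      = (PySem.List.pyRange 0 (matriz.length : Int) 1).map (fun _ => 0) := by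
    rw [List.map_const']
    simp [PySem.List.length_pyRange_one]
  rw [hrep, foldl_stepRowB]
  -- rewrite the final all-check to compare column maxima directly
  have hall : (PySem.List.pyRange 0 ((matriz.length : Int) - 1) 1).all
        (fun j => decide (PySem.List.pyGetD ((PySem.List.pyRange 0 (matriz.length : Int) 1).map (colmax matriz)) j 0
          > PySem.List.pyGetD ((PySem.List.pyRange 0 (matriz.length : Int) 1).map (colmax matriz)) (j + 1) 0))
      = (PySem.List.pyRange 0 ((matriz.length : Int) - 1) 1).all
        (fun j => decide (colmax matriz j > colmax matriz (j + 1))) := by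
    apply all_congr_mem
    intro j hj
    rw [PySem.List.mem_pyRange_one] at hj
    rw [PySem.List.pyGetD_map_pyRange_of_nonneg _ _ _ _ (by omega) (by omega),
        PySem.List.pyGetD_map_pyRange_of_nonneg _ _ _ _ (by omega) (by omega)]
  have hcm : (fun j => List.foldl (fun m f => if PySem.List.pyGetD f j 0 > m then PySem.List.pyGetD f j 0 else m) 0 matriz) = colmax matriz := rfl
  rw [hcm, hall]
  show decList (colmax matriz 0) ((PySem.List.pyRange 1 (matriz.length : Int) 1).map (colmax matriz)) = _
  -- both sides are the chain check over the column maxima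
  have hk : (matriz.length : Int) = 0 + 1 + ((matriz.length - 1 : Nat) : Int) := by
    push_cast; omega
  have hchain := chain_all_eq (colmax matriz) (matriz.length - 1) 0
  rw [hk]
  convert hchain using 3; push_cast; omega
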